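-- pv_equiv track=rewrite | github.com/nmounzih/what_to_watch | movie_lib.py | compare_movie_lists
-- ===== SOURCE A (Python) =====
-- def compare_movie_lists(user1_list, user2_list):
--     user1 = set()
--     user2 = set()
--     for movie_tupes_list in user1_list:
--         for single_tupe in movie_tupes_list:
--             user1.add(single_tupe)
--     for movie_tupes_list in user2_list:
--         for single_tupe in movie_tupes_list:
--             user2.add(single_tupe)
--     return user1 ^ user2
-- ===== SOURCE B (Python) =====
-- def compare_movie_lists(user1_list, user2_list):
--     # No auxiliary sets/dicts: membership is decided by scanning the other
--     # user's nested lists directly; collect each side's exclusive movies in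
--     # first-occurrence order, then return them as a set.
--     def occurs(movie, lists):
--         return any(movie in inner for inner in lists)
--
--     only1 = []
--     for inner in user1_list:
--         for movie in inner:
--             if not occurs(movie, user2_list) and movie not in only1:
--                 only1.append(movie)
--     only2 = []
--     for inner in user2_list:
--         for movie in inner:
--             if not occurs(movie, user1_list) and movie not in only2:
--                 only2.append(movie)
--     return set(only1 + only2)
-- ===== Notes on version B (the rewrite author's own statement) =====
-- stated objective: alternative
-- what changed: B builds no sets or dicts at all: it decides membership by scanning the other user's nested lists directly and collects each side's exclusive movies with an explicit dedup-append accumulator, trading A's hashed set builds + XOR for quadratic direct scans.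
import Mathlib
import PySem

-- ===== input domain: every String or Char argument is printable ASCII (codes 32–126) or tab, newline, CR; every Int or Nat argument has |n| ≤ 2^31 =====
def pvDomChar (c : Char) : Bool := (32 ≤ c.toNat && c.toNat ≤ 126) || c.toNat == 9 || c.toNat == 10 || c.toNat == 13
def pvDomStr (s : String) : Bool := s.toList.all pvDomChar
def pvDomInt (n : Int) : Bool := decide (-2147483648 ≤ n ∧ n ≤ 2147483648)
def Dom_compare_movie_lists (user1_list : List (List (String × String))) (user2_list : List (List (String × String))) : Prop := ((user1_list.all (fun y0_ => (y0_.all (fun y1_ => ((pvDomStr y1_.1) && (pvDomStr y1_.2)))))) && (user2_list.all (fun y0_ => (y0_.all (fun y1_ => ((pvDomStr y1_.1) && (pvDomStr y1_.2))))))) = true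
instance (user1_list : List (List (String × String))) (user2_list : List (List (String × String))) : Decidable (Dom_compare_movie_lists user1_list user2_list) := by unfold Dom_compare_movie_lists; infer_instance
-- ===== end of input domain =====

-- B builds no sets or dicts at all: it decides membership by scanning the other user's
-- nested lists directly and collects each side's exclusive movies with an explicit
-- dedup-append accumulator (alternative decomposition; not faster).
-- Both Pythons return sets; the ports agree on the representative element list too.

-- ===== PORT A =====
def compare_movie_lists (user1_list : List (List (String × String))) (user2_list : List (List (String × String))) : List (String × String) :=
  let user1 := user1_list.foldl
    (fun s movie_tupes_list => movie_tupes_list.foldl (fun s single_tupe => PySem.Set.add s single_tupe) s)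
    (PySem.Set.empty)
  let user2 := user2_list.foldl
    (fun s movie_tupes_list => movie_tupes_list.foldl (fun s single_tupe => PySem.Set.add s single_tupe) s)
    (PySem.Set.empty)
  PySem.Set.symmDiff user1 user2

-- ===== PORT B =====
-- occurs(movie, lists) = any(movie in inner for inner in lists)
def cmlOccurs (movie : String × String) (lists : List (List (String × String))) : Bool :=
  lists.any (fun inner => inner.contains movie)

def compare_movie_lists_alt (user1_list : List (List (String × String))) (user2_list : List (List (String × String))) : List (String × String) :=
  let only1 := user1_list.foldl (fun only1 inner => inner.foldl (fun only1 movie =>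
      if !cmlOccurs movie user2_list && !only1.contains movie then only1 ++ [movie] else only1) only1) []
  let only2 := user2_list.foldl (fun only2 inner => inner.foldl (fun only2 movie =>
      if !cmlOccurs movie user1_list && !only2.contains movie then only2 ++ [movie] else only2) only2) []
  PySem.Set.ofList (only1 ++ only2)

-- ===== PRECONDITION & SPEC =====
def Spec_compare_movie_lists (user1_list : List (List (String × String))) (user2_list : List (List (String × String))) (out : List (String × String)) : Prop := out = compare_movie_lists_alt user1_list user2_list
instance (user1_list : List (List (String × String))) (user2_list : List (List (String × String))) (out : List (String × String)) : Decidable (Spec_compare_movie_lists user1_list user2_list out) := by unfold Spec_compare_movie_lists; infer_instance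

-- ===== CLAIM (what is proved, stated in full; the proofs are below) =====
def Claim_equal_compare_movie_lists : Prop := ∀ (user1_list : List (List (String × String))) (user2_list : List (List (String × String))), Dom_compare_movie_lists user1_list user2_list → Spec_compare_movie_lists user1_list user2_list (compare_movie_lists user1_list user2_list)

-- ===== LEMMAS AND PROOFS =====

theorem foldl_foldl_flatten {σ α : Type} (f : σ → α → σ) (u : List (List α)) (s : σ) :
    u.foldl (fun s sub => sub.foldl f s) s = (u.flatMap id).foldl f s := by
  induction u generalizing s with
  | nil => rfl
  | cons h t ih => simp [List.flatMap_cons, List.foldl_append, ih]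

-- the dedup-append loop restricted by p is fold of Set.add over the filtered list
theorem collect_eq_filter_add (p : (String × String) → Bool) (l : List (String × String)) :
    ∀ acc : List (String × String),
    l.foldl (fun acc m => if p m && !acc.contains m then acc ++ [m] else acc) acc
      = (l.filter p).foldl PySem.Set.add acc := by
  induction l with
  | nil => intro acc; rfl
  | cons h t ih =>
    intro acc
    rw [List.foldl_cons, List.filter_cons]
    by_cases hp : p h
    · have : (if p h && !acc.contains h then acc ++ [h] else acc) = PySem.Set.add acc h := by
        simp only [PySem.Set.add, PySem.Set.contains, hp, Bool.true_and]
        by_cases hc : acc.contains h <;> simp [hc]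
      rw [this, if_pos hp, List.foldl_cons, ih]
    · have h1 : (if p h && !acc.contains h then acc ++ [h] else acc) = acc := by simp [hp]
      rw [h1, if_neg hp, ih]

theorem filter_set_add (p : (String × String) → Bool) (s : List (String × String)) (x : String × String) :
    (PySem.Set.add s x).filter p = if p x then PySem.Set.add (s.filter p) x else s.filter p := by
  by_cases hpx : p x
  · by_cases hxs : x ∈ s
    · have h1 : PySem.Set.add s x = s := by
        simp [PySem.Set.add, PySem.Set.contains, List.contains_eq_mem, hxs]
      have h2 : PySem.Set.add (s.filter p) x = s.filter p := by
        simp [PySem.Set.add, PySem.Set.contains, List.contains_eq_mem, List.mem_filter, hxs, hpx]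
      simp [h1, h2, hpx]
    · have h1 : PySem.Set.add s x = s ++ [x] := by
        simp [PySem.Set.add, PySem.Set.contains, List.contains_eq_mem, hxs]
      have h2 : PySem.Set.add (s.filter p) x = s.filter p ++ [x] := by
        have : x ∉ s.filter p := fun h => hxs (List.mem_of_mem_filter h)
        simp [PySem.Set.add, PySem.Set.contains, List.contains_eq_mem, this]
      simp [h1, h2, hpx, List.filter_append]
  · have h2 : (PySem.Set.add s x).filter p = s.filter p := by
      by_cases hxs : x ∈ s
      · simp [PySem.Set.add, PySem.Set.contains, List.contains_eq_mem, hxs]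
      · simp [PySem.Set.add, PySem.Set.contains, List.contains_eq_mem, hxs, List.filter_append, hpx]
    simp [h2, hpx]

theorem ofList_filter (p : (String × String) → Bool) (l : List (String × String)) :
    ∀ s : List (String × String),
    (l.foldl PySem.Set.add s).filter p = (l.filter p).foldl PySem.Set.add (s.filter p) := by
  induction l with
  | nil => intro s; simp
  | cons h t ih =>
    intro s
    rw [List.foldl_cons, ih, List.filter_cons]
    by_cases hp : p h
    · simp [hp, filter_set_add, List.foldl_cons]
    · simp [hp, filter_set_add]

theorem foldl_add_of_nodup (l : List (String × String)) :
    ∀ s : List (String × String), (s ++ l).Nodup → l.foldl PySem.Set.add s = s ++ l := by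
  induction l with
  | nil => intro s _; simp
  | cons h t ih =>
    intro s hnd
    have hhs : h ∉ s := by
      intro hmem
      exact (List.disjoint_of_nodup_append hnd) hmem (by simp)
    have hadd : PySem.Set.add s h = s ++ [h] := by
      simp [PySem.Set.add, PySem.Set.contains, List.contains_eq_mem, hhs]
    rw [List.foldl_cons, hadd, ih (s ++ [h]) (by simpa using hnd)]
    simp

theorem cmlOccurs_eq (m : String × String) (ls : List (List (String × String))) :
    cmlOccurs m ls = decide (m ∈ ls.flatMap id) := by
  rw [Bool.eq_iff_iff]
  simp [cmlOccurs, List.any_eq_true, List.contains_eq_mem]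

theorem final (u1 u2 : List (List (String × String))) :
    compare_movie_lists u1 u2 = compare_movie_lists_alt u1 u2 := by
  -- A side: two set builds then symmDiff = two filters over the dedup'd flattened lists
  have hA : compare_movie_lists u1 u2
      = (PySem.Set.ofList (u1.flatMap id)).filter (fun x => !(PySem.Set.ofList (u2.flatMap id)).contains x)
        ++ (PySem.Set.ofList (u2.flatMap id)).filter (fun x => !(PySem.Set.ofList (u1.flatMap id)).contains x) := by
    show PySem.Set.symmDiff _ _ = _
    rw [foldl_foldl_flatten, foldl_foldl_flatten]
    rfl
  -- B side: each collection loop equals the corresponding filter of the dedup'd flattened list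
  have honly : ∀ (a b : List (List (String × String))),
      a.foldl (fun acc inner => inner.foldl (fun acc m =>
        if !cmlOccurs m b && !acc.contains m then acc ++ [m] else acc) acc) []
      = (PySem.Set.ofList (a.flatMap id)).filter (fun x => !(PySem.Set.ofList (b.flatMap id)).contains x) := by
    intro a b
    rw [foldl_foldl_flatten, collect_eq_filter_add (fun m => !cmlOccurs m b) (a.flatMap id) []]
    have h1 : (a.flatMap id).filter (fun m => !cmlOccurs m b)
        = (a.flatMap id).filter (fun x => !(PySem.Set.ofList (b.flatMap id)).contains x) := by
      apply List.filter_congr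
      intro x _
      simp [cmlOccurs_eq, PySem.Set.contains, List.contains_eq_mem, PySem.Set.mem_ofList]
    rw [h1]
    have := ofList_filter (fun x => !(PySem.Set.ofList (b.flatMap id)).contains x) (a.flatMap id) []
    simpa [PySem.Set.ofList, PySem.Set.empty] using this.symm
  -- abbreviations for the two halves
  set f1 := (PySem.Set.ofList (u1.flatMap id)).filter (fun x => !(PySem.Set.ofList (u2.flatMap id)).contains x) with hf1
  set f2 := (PySem.Set.ofList (u2.flatMap id)).filter (fun x => !(PySem.Set.ofList (u1.flatMap id)).contains x) with hf2
  have hB : compare_movie_lists_alt u1 u2 = PySem.Set.ofList (f1 ++ f2) := by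
    show PySem.Set.ofList _ = _
    rw [honly u1 u2, honly u2 u1]
  -- f1 ++ f2 is duplicate-free, so the outer set() leaves it unchanged
  have hnd : (f1 ++ f2).Nodup := by
    apply List.Nodup.append
    · exact (PySem.Set.nodup_ofList _).filter _
    · exact (PySem.Set.nodup_ofList _).filter _
    · intro x hx1 hx2
      have hm1 : x ∈ PySem.Set.ofList (u1.flatMap id) := List.mem_of_mem_filter hx1
      have h4 := List.of_mem_filter hx2
      simp only [Bool.not_eq_eq_eq_not, Bool.not_true, PySem.Set.contains,
        List.contains_eq_mem, decide_eq_false_iff_not] at h4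
      exact h4 hm1
  have hid : PySem.Set.ofList (f1 ++ f2) = f1 ++ f2 := by
    show List.foldl PySem.Set.add PySem.Set.empty _ = _
    have h := foldl_add_of_nodup (f1 ++ f2) [] (by rw [List.nil_append]; exact hnd)
    rw [List.nil_append] at h
    exact h
  rw [hA, hB, hid]

-- ===== VERDICT (by name: the statement is the Claim_ definition above) =====
theorem compare_movie_lists_spec : Claim_equal_compare_movie_lists := by
  intro user1_list user2_list _
  exact final user1_list user2_list
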